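-- pv_equiv track=rewrite | github.com/YaroslavYaryk/python_stuff | Fun/list_of_special_elements.py | show_elem
-- ===== SOURCE A (Python) =====
-- def show_elem(n:int):
--     a = [0]*(n+1)
--     x = 0
--     y = 1
--     a[0] = 1
--     a[1] = 100
--     while not a[n-1]:
--         a[x+2] = a[x] + 1
--         a[y+2] = a[y] * 2
--
--         x+=2
--         y+=2
--     return a[n-1]
-- ===== SOURCE B (Python) =====
-- def show_elem(n: int):
--     # Closed form: the sequence interleaves 1,2,3,... at even indices
--     # and 100,200,400,... at odd indices; return the value at index n-1.
--     m = n - 1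
--     if m % 2 == 0:
--         return m // 2 + 1
--     return 100 * 2 ** (m // 2)
-- ===== Notes on version B (the rewrite author's own statement) =====
-- stated objective: faster
-- what changed: Replaced the array-filling while loop with the closed form for index n-1: even index i gives i/2+1, odd index i gives 100*2^(i/2).
import Mathlib
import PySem

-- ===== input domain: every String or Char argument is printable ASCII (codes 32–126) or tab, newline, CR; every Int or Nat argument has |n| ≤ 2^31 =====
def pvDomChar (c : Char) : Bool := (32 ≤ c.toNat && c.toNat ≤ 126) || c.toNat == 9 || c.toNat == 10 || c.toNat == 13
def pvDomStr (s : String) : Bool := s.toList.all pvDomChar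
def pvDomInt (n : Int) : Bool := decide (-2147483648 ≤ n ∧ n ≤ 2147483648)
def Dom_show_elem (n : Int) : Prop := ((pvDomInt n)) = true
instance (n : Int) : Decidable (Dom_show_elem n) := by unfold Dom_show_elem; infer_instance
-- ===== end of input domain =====

-- B replaces A's array-filling while loop by the closed form for the value at index n-1 (objective: faster).

-- ===== PORT A =====
-- the while loop of A; fuel only guards totality (the loop terminates after at most (n+1)/2 iterations for every n admitted by Pre_)
def showElemLoop (a : List Int) (x y t : Int) : Nat → List Int
  | 0 => a
  | fuel + 1 =>
    if PySem.List.pyGetD a t 0 = 0 then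
      let a1 := PySem.List.pySetD a (x + 2) (PySem.List.pyGetD a x 0 + 1)
      let a2 := PySem.List.pySetD a1 (y + 2) (PySem.List.pyGetD a1 y 0 * 2)
      showElemLoop a2 (x + 2) (y + 2) t fuel
    else a

def show_elem (n : Int) : Int :=
  let a0 := List.replicate (n + 1).toNat (0 : Int)
  let a1 := PySem.List.pySetD a0 0 1
  let a2 := PySem.List.pySetD a1 1 100
  let a := showElemLoop a2 0 1 (n - 1) (n + 1).toNat
  PySem.List.pyGetD a (n - 1) 0

-- ===== PORT B =====
def show_elem_alt (n : Int) : Int :=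
  let m := n - 1
  if PySem.Int.mod m 2 = 0 then
    PySem.Int.floordiv m 2 + 1
  else
    100 * 2 ^ (PySem.Int.floordiv m 2).toNat  -- m // 2 ≥ 0 under Pre_, so toNat is exact

-- ===== PRECONDITION & SPEC =====
-- A raises IndexError for n ≤ 0 (writing a[1] into a list of length ≤ 1, or a[0] into an empty/negative-size list).
def Pre_show_elem (n : Int) : Prop := 1 ≤ n
instance (n : Int) : Decidable (Pre_show_elem n) := by unfold Pre_show_elem; infer_instance
def pvWitness_show_elem : Int := 5

def Spec_show_elem (n : Int) (out : Int) : Prop := out = show_elem_alt n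
instance (n : Int) (out : Int) : Decidable (Spec_show_elem n out) := by unfold Spec_show_elem; infer_instance

-- ===== CLAIM (what is proved, stated in full; the proofs are below) =====
def Claim_equal_show_elem : Prop := ∀ (n : Int), Dom_show_elem n → Pre_show_elem n → Spec_show_elem n (show_elem n)

-- ===== LEMMAS AND PROOFS =====

-- value of the special sequence at index i
def fval (i : Nat) : Int := if i % 2 = 0 then ((i / 2 : Nat) : Int) + 1 else 100 * 2 ^ ((i - 1) / 2)

-- A's list after k loop iterations (list length N)
def stateL (N k : Nat) : List Int := (List.range N).map (fun i => if i ≤ 2 * k + 1 then fval i else 0)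

lemma fval_pos (i : Nat) : 0 < fval i := by
  unfold fval; split_ifs <;> positivity

lemma fval_even (k : Nat) : fval (2 * k) = (k : Int) + 1 := by
  simp [fval, Nat.mul_mod_right]

lemma fval_odd (k : Nat) : fval (2 * k + 1) = 100 * 2 ^ k := by
  have h1 : (2 * k + 1) % 2 = 1 := by omega
  have h2 : (2 * k + 1 - 1) / 2 = k := by omega
  simp [fval, h1]

lemma stateL_length (N k : Nat) : (stateL N k).length = N := by
  simp [stateL]

lemma stateL_getD (N k i : Nat) (h : i < N) :
    PySem.List.pyGetD (stateL N k) (i : Int) 0 = if i ≤ 2 * k + 1 then fval i else 0 := by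
  simp [stateL, List.getD, h]

lemma state_step (N k : Nat) (h : 2 * k + 3 < N) :
    PySem.List.pySetD
      (PySem.List.pySetD (stateL N k) (((2 * k : Nat) : Int) + 2)
        (PySem.List.pyGetD (stateL N k) ((2 * k : Nat) : Int) 0 + 1))
      (((2 * k + 1 : Nat) : Int) + 2)
      (PySem.List.pyGetD
        (PySem.List.pySetD (stateL N k) (((2 * k : Nat) : Int) + 2)
          (PySem.List.pyGetD (stateL N k) ((2 * k : Nat) : Int) 0 + 1))
        ((2 * k + 1 : Nat) : Int) 0 * 2)
      = stateL N (k + 1) := by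
  have hx : (((2 * k : Nat) : Int) + 2) = ((2 * k + 2 : Nat) : Int) := by push_cast; ring
  have hy : (((2 * k + 1 : Nat) : Int) + 2) = ((2 * k + 3 : Nat) : Int) := by push_cast; ring
  have hr1 : PySem.List.pyGetD (stateL N k) ((2 * k : Nat) : Int) 0 = fval (2 * k) := by
    rw [stateL_getD N k (2 * k) (by omega)]; simp
  have hr2 : PySem.List.pyGetD (stateL N k) ((2 * k + 1 : Nat) : Int) 0 = fval (2 * k + 1) := by
    rw [stateL_getD N k (2 * k + 1) (by omega)]; simp
  rw [hx, hy, hr1]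
  rw [PySem.List.pyGetD_pySetD_natCast (stateL N k) (2 * k + 2) (2 * k + 1)
      (fval (2 * k) + 1) 0 (by rw [stateL_length]; omega)]
  rw [if_neg (by omega), hr2]
  simp only [PySem.List.pySetD_natCast]
  apply List.ext_getElem
  · simp [stateL]
  · intro i h1 h2
    simp only [stateL, List.getElem_set, List.getElem_map, List.getElem_range] at *
    have hi : i < N := by simpa [stateL] using h2
    rcases Nat.lt_trichotomy i (2 * k + 2) with hlt | heq | hgt
    · rw [if_neg (by omega), if_neg (by omega)]
      rw [if_pos (by omega), if_pos (by omega)]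
    · subst heq
      rw [if_neg (by omega), if_pos rfl, if_pos (by omega)]
      have : fval (2 * k + 2) = fval (2 * k) + 1 := by
        have := fval_even k
        have := fval_even (k + 1)
        rw [show 2 * k + 2 = 2 * (k + 1) by ring, fval_even, fval_even]
        push_cast; ring
      rw [this]
    · rcases Nat.lt_trichotomy i (2 * k + 3) with hlt' | heq' | hgt'
      · omega
      · subst heq'
        rw [if_pos rfl, if_pos (by omega)]
        rw [show 2 * k + 3 = 2 * (k + 1) + 1 by ring, fval_odd, fval_odd]
        ring
      · rw [if_neg (by omega), if_neg (by omega), if_neg (by omega), if_neg (by omega)]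

lemma loop_reaches (N T : Nat) (hT : T + 1 < N) :
    ∀ (fuel k : Nat), T ≤ 2 * k + 2 * fuel + 1 →
      PySem.List.pyGetD
        (showElemLoop (stateL N k) ((2 * k : Nat) : Int) ((2 * k + 1 : Nat) : Int) (T : Int) fuel)
        (T : Int) 0 = fval T := by
  intro fuel
  induction fuel with
  | zero =>
    intro k hk
    rw [showElemLoop, stateL_getD N k T (by omega), if_pos (by omega)]
  | succ fuel ih =>
    intro k hk
    by_cases hle : T ≤ 2 * k + 1
    · rw [showElemLoop, if_neg (by
        rw [stateL_getD N k T (by omega), if_pos hle]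
        exact ne_of_gt (fval_pos T))]
      rw [stateL_getD N k T (by omega), if_pos hle]
    · rw [showElemLoop, if_pos (by
        rw [stateL_getD N k T (by omega), if_neg hle])]
      simp only
      rw [state_step N k (by omega)]
      have hx : (((2 * k : Nat) : Int) + 2) = ((2 * (k + 1) : Nat) : Int) := by push_cast; ring
      have hy : (((2 * k + 1 : Nat) : Int) + 2) = ((2 * (k + 1) + 1 : Nat) : Int) := by push_cast; ring
      rw [hx, hy]
      exact ih (k + 1) (by omega)

lemma init_state (N : Nat) (_h : 2 ≤ N) :
    ((List.replicate N (0 : Int)).set 0 1).set 1 100 = stateL N 0 := by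
  apply List.ext_getElem
  · simp [stateL]
  · intro i h1 h2
    have hi : i < N := by simpa using h1
    simp only [stateL, List.getElem_set, List.getElem_map, List.getElem_range,
      List.getElem_replicate]
    rcases i with _ | _ | i
    · norm_num [fval]
    · norm_num [fval]
    · rw [if_neg (by omega), if_neg (by omega), if_neg (by omega)]

lemma fval_eq_alt (n : Int) (hn : 1 ≤ n) : fval (n - 1).toNat = show_elem_alt n := by
  have hT : (((n - 1).toNat : Nat) : Int) = n - 1 := by omega
  unfold show_elem_alt
  rw [← hT]
  rcases Nat.even_or_odd (n - 1).toNat with ⟨q, hq⟩ | ⟨q, hq⟩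
  · rw [hq, show q + q = 2 * q by ring, Int.toNat_natCast, fval_even]
    have hm : PySem.Int.mod ((2 * q : Nat) : Int) 2 = 0 := by
      rw [PySem.Int.mod_eq_emod_of_pos (by norm_num : (0:Int) < 2)]; omega
    have hd : PySem.Int.floordiv ((2 * q : Nat) : Int) 2 = (q : Int) := by
      rw [PySem.Int.floordiv_eq_ediv_of_pos (by norm_num : (0:Int) < 2)]; omega
    simp only [hm, hd]; norm_num
  · rw [hq, Int.toNat_natCast, fval_odd]
    have hm : PySem.Int.mod ((2 * q + 1 : Nat) : Int) 2 = 1 := by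
      rw [PySem.Int.mod_eq_emod_of_pos (by norm_num : (0:Int) < 2)]; omega
    have hd : PySem.Int.floordiv ((2 * q + 1 : Nat) : Int) 2 = (q : Int) := by
      rw [PySem.Int.floordiv_eq_ediv_of_pos (by norm_num : (0:Int) < 2)]; omega
    simp only [hm, hd]; norm_num

-- ===== VERDICT (by name: the statement is the Claim_ definition above) =====
theorem show_elem_spec : Claim_equal_show_elem := by
  intro n _ hn
  unfold Pre_show_elem at hn
  unfold Spec_show_elem show_elem
  simp only [PySem.List.pySetD_of_nonneg _ (1 : Int) (by norm_num : (0:Int) ≤ 0),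
    PySem.List.pySetD_of_nonneg _ (100 : Int) (by norm_num : (0:Int) ≤ 1)]
  norm_num
  rw [init_state (n + 1).toNat (by omega)]
  have hl := loop_reaches (n + 1).toNat (n - 1).toNat (by omega) (n + 1).toNat 0 (by omega)
  simp only [show 2 * 0 = 0 from rfl, show 2 * 0 + 1 = 1 from rfl, Nat.cast_zero, Nat.cast_one] at hl
  rw [show (n - 1 : Int) = (((n - 1).toNat : Nat) : Int) by omega, hl]
  exact fval_eq_alt n hn
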